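-- pv_equiv track=rewrite | github.com/rafaself/Benchmark-RuleShift | src/core/validate.py | _count_in_canonical_order
-- ===== SOURCE A (Python) =====
-- from typing import Final, Iterable, Mapping
--
-- def _count_in_canonical_order(
--     values: Iterable[str],
--     order: tuple[str, ...],
-- ) -> tuple[tuple[str, int], ...]:
--     counts = {key: 0 for key in order}
--     for value in values:
--         if value in counts:
--             counts[value] += 1
--     return tuple((key, counts[key]) for key in order)
-- ===== SOURCE B (Python) =====
-- def _count_in_canonical_order(values, order):
--     # Sort a materialized copy, collapse it into runs of equal values once,
--     # then read each canonical key's multiplicity out of the run table.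
--     svals = sorted(values)
--     groups = {}
--     i = 0
--     while i < len(svals):
--         j = i + 1
--         while j < len(svals) and svals[j] == svals[i]:
--             j += 1
--         groups[svals[i]] = j - i
--         i = j
--     return tuple((key, groups.get(key, 0)) for key in order)
-- ===== Notes on version B (the rewrite author's own statement) =====
-- stated objective: alternative
-- what changed: Replaces the hash-count pass (dict of zeroed canonical keys incremented per value) with sort-then-scan: sort the values, collapse the sorted list into runs of equal elements to get each distinct value's multiplicity, and look each canonical key up in that run table with default 0.
import Mathlib
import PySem

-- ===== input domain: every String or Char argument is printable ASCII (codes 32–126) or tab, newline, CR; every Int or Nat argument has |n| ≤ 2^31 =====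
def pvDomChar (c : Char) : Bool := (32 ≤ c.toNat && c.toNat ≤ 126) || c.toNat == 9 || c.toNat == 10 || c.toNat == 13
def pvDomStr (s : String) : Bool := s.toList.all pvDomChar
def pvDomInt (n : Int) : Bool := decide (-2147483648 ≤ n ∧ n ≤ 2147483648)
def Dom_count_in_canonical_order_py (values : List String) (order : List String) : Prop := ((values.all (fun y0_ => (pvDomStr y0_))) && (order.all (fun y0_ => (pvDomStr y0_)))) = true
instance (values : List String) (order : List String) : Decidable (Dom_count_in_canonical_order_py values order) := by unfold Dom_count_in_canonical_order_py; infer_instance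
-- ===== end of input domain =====

-- B replaces A's one-pass hash counting with sort-then-scan run-length grouping (objective: alternative algorithm, not faster).
-- ===== PORT A =====
def count_in_canonical_order_py (values : List String) (order : List String) : List (String × Int) :=
  -- counts = {key: 0 for key in order}
  let counts : PySem.Dict String Int := order.foldl (fun d key => d.insert key 0) PySem.Dict.empty
  -- for value in values: if value in counts: counts[value] += 1
  let counts := values.foldl
    (fun d value => if d.contains value then d.modify value 0 (· + 1) else d) counts
  -- tuple((key, counts[key]) for key in order)  — key is always present, so counts[key] = getD key 0
  order.map (fun key => (key, counts.getD key 0))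

-- ===== PORT B =====
-- the outer 'while i < len(svals):' loop of Source B, with the unscanned suffix
-- svals[i:] represented as a list: head = svals[i]; the inner 'while' advances j
-- over the run of head, i.e. j - i = 1 + length of the equal prefix of the tail;
-- 'i = j' continues on the suffix with that equal prefix dropped
def pvGroups : List String → PySem.Dict String Int → PySem.Dict String Int
  | [], groups => groups
  | head :: t, groups =>
      let run := t.takeWhile (fun v => v == head)
      pvGroups (t.dropWhile (fun v => v == head))
        (groups.insert head (1 + (run.length : Int)))  -- groups[svals[i]] = j - i
termination_by l _ => l.length
decreasing_by
  exact Nat.lt_succ_of_le (List.Sublist.length_le (List.dropWhile_sublist _))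

def count_in_canonical_order_py_alt (values : List String) (order : List String) : List (String × Int) :=
  -- svals = sorted(values)
  let svals := PySem.List.sorted values (fun x => x) false
  -- while i < len(svals): … build the run table 'groups' (pvGroups scans svals[i:])
  let groups := pvGroups svals PySem.Dict.empty
  -- tuple((key, groups.get(key, 0)) for key in order)
  order.map (fun key => (key, groups.getD key 0))

-- ===== PRECONDITION & SPEC =====
def Spec_count_in_canonical_order_py (values : List String) (order : List String) (out : List (String × Int)) : Prop := out = count_in_canonical_order_py_alt values order
instance (values : List String) (order : List String) (out : List (String × Int)) : Decidable (Spec_count_in_canonical_order_py values order out) := by unfold Spec_count_in_canonical_order_py; infer_instance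

-- ===== CLAIM (what is proved, stated in full; the proofs are below) =====
def Claim_equal_count_in_canonical_order_py : Prop := ∀ (values : List String) (order : List String), Dom_count_in_canonical_order_py values order → Spec_count_in_canonical_order_py values order (count_in_canonical_order_py values order)

-- ===== LEMMAS AND PROOFS =====

-- A side: the zero-initialisation loop leaves every getD-with-default-0 at 0
theorem pv_init_getD (os : List String) (d : PySem.Dict String Int)
    (h : ∀ x, d.getD x 0 = 0) (k : String) :
    (os.foldl (fun d key => d.insert key 0) d).getD k 0 = 0 := by
  induction os generalizing d with
  | nil => exact h k
  | cons o os ih =>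
    simp only [List.foldl_cons]
    exact ih _ (fun x => by rw [PySem.Dict.getD_insert]; split <;> [rfl; exact h x])

-- A side: every key of order is present in the initial dict
theorem pv_init_contains (os : List String) (d : PySem.Dict String Int) (k : String)
    (h : k ∈ os ∨ d.contains k = true) :
    (os.foldl (fun d key => d.insert key 0) d).contains k = true := by
  induction os generalizing d with
  | nil => exact h.resolve_left (by simp)
  | cons o os ih =>
    simp only [List.foldl_cons]
    rcases h with h | h
    · rcases List.mem_cons.mp h with rfl | h
      · exact ih _ (Or.inr (PySem.Dict.contains_insert_self ..))
      · exact ih _ (Or.inl h)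
    · refine ih _ (Or.inr ?_)
      rw [PySem.Dict.contains_insert, h]; simp

-- A side: the counting loop adds vs.count k to any key already present
theorem pv_loop_getD (vs : List String) (d : PySem.Dict String Int) (k : String)
    (hk : d.contains k = true) :
    (vs.foldl (fun d value => if d.contains value then d.modify value 0 (· + 1) else d) d).getD k 0
      = d.getD k 0 + (vs.count k : Int) := by
  induction vs generalizing d with
  | nil => simp
  | cons v vs ih =>
    simp only [List.foldl_cons]
    by_cases hv : d.contains v = true
    · rw [if_pos hv]
      have hk' : (d.modify v 0 (· + 1)).contains k = true := by
        rw [PySem.Dict.contains_modify]; simp [hk]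
      rw [ih _ hk', PySem.Dict.getD_modify, List.count_cons]
      by_cases hkv : k = v
      · subst hkv; simp; ring
      · rw [if_neg hkv]
        simp [Ne.symm hkv]
    · rw [if_neg hv, ih _ hk, List.count_cons]
      have hkv : v ≠ k := fun h => hv (h ▸ hk)
      simp [hkv]

-- B side: in a sorted tail all of whose elements dominate head, head does not
-- survive dropping its equal prefix
theorem pv_head_not_mem_dropWhile (head : String) (t : List String)
    (hp : t.Pairwise (· ≤ ·)) (hle : ∀ x ∈ t, head ≤ x) :
    head ∉ t.dropWhile (fun v => v == head) := by
  induction t with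
  | nil => simp
  | cons a t ih =>
    rw [List.dropWhile_cons]
    by_cases ha : a = head
    · subst ha
      simp only [beq_self_eq_true, if_true]
      exact ih hp.of_cons (fun x hx => hle x (List.mem_cons_of_mem _ hx))
    · simp only [beq_iff_eq, ha, if_false]
      intro hmem
      rcases List.mem_cons.mp hmem with h | h
      · exact ha h.symm
      · have h1 : a ≤ head := (List.pairwise_cons.mp hp).1 head h
        have h2 : head ≤ a := hle a (List.mem_cons_self)
        exact ha (le_antisymm h1 h2)

-- B side: the run table of a sorted list reads back each member's count
theorem pv_groups_getD (s : List String) (hs : s.Pairwise (· ≤ ·))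
    (g : PySem.Dict String Int) (k : String) :
    (pvGroups s g).getD k 0 = if k ∈ s then (s.count k : Int) else g.getD k 0 := by
  induction s, g using pvGroups.induct with
  | case1 g => simp [pvGroups]
  | case2 head t g run ih =>
    rw [pvGroups]
    have hsplit : t.takeWhile (fun v => v == head) ++ t.dropWhile (fun v => v == head) = t :=
      List.takeWhile_append_dropWhile
    have hrun : ∀ x ∈ t.takeWhile (fun v => v == head), x = head := by
      intro x hx
      have hpx := List.mem_takeWhile_imp hx
      simpa using hpx
    have hletail : ∀ x ∈ t, head ≤ x := (List.pairwise_cons.mp hs).1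
    have hptail : t.Pairwise (· ≤ ·) := hs.of_cons
    have hpdrop : (t.dropWhile (fun v => v == head)).Pairwise (· ≤ ·) :=
      hptail.sublist (List.dropWhile_sublist _)
    have hnot : head ∉ t.dropWhile (fun v => v == head) :=
      pv_head_not_mem_dropWhile head t hptail hletail
    have hcount_run : ∀ k', (t.takeWhile (fun v => v == head)).count k'
        = if k' = head then (t.takeWhile (fun v => v == head)).length else 0 := by
      intro k'
      by_cases hk' : k' = head
      · subst hk'
        rw [if_pos rfl]
        exact (List.count_eq_length).mpr (fun b hb => (hrun b hb).symm)
      · rw [if_neg hk']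
        exact List.count_eq_zero.mpr (fun h => hk' (hrun _ h))
    rw [ih hpdrop]
    by_cases hk : k = head
    · subst hk
      rw [if_neg hnot, PySem.Dict.getD_insert_self, if_pos (List.mem_cons_self)]
      have hct : t.count k = (t.takeWhile (fun v => v == k)).length := by
        conv_lhs => rw [← hsplit]
        rw [List.count_append, hcount_run, if_pos rfl, List.count_eq_zero.mpr hnot]
        omega
      rw [List.count_cons_self, hct]; push_cast; ring
    · rw [PySem.Dict.getD_insert, if_neg hk]
      have hmem : k ∈ head :: t ↔ k ∈ t.dropWhile (fun v => v == head) := by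
        constructor
        · intro h
          rcases List.mem_cons.mp h with h | h
          · exact absurd h hk
          · rw [← hsplit] at h
            rcases List.mem_append.mp h with h | h
            · exact absurd (hrun _ h) hk
            · exact h
        · intro h
          exact List.mem_cons_of_mem _ ((hsplit ▸ List.mem_append_right _ h))
      have hcnt : (head :: t).count k = (t.dropWhile (fun v => v == head)).count k := by
        have h1 : t.count k = (t.dropWhile (fun v => v == head)).count k := by
          conv_lhs => rw [← hsplit]
          rw [List.count_append, hcount_run, if_neg hk]
          omega
        have hne : ¬head = k := fun h => hk h.symm
        rw [List.count_cons, h1]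
        simp [hne]
      rw [← hcnt]
      by_cases hm : k ∈ t.dropWhile (fun v => v == head)
      · rw [if_pos hm, if_pos (hmem.mpr hm)]
      · rw [if_neg hm, if_neg (fun h => hm (hmem.mp h))]

-- ===== VERDICT (by name: the statement is the Claim_ definition above) =====
theorem count_in_canonical_order_py_spec : Claim_equal_count_in_canonical_order_py := by
  intro values order _
  unfold Spec_count_in_canonical_order_py count_in_canonical_order_py count_in_canonical_order_py_alt
  refine List.map_congr_left (fun key hkey => ?_)
  -- A side: counts[key] = values.count key
  have hc : ((order.foldl (fun d key => d.insert key 0)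
      (PySem.Dict.empty : PySem.Dict String Int))).contains key = true :=
    pv_init_contains order _ key (Or.inl hkey)
  rw [pv_loop_getD _ _ _ hc,
      pv_init_getD order _ (fun x => by simp [PySem.Dict.getD_empty]) key]
  -- B side: groups[key] with default 0 = values.count key
  have hperm : (PySem.List.sorted values (fun x => x) false).Perm values :=
    PySem.List.sorted_perm ..
  have hs : (PySem.List.sorted values (fun x => x) false).Pairwise (· ≤ ·) := by
    have := PySem.List.sorted_pairwise (xs := values) (key := fun x => x)
    simpa using this
  rw [pv_groups_getD _ hs]
  by_cases hm : key ∈ PySem.List.sorted values (fun x => x) false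
  · rw [if_pos hm, hperm.count_eq]; simp
  · rw [if_neg hm, PySem.Dict.getD_empty]
    have : values.count key = 0 :=
      List.count_eq_zero.mpr (fun h => hm (hperm.mem_iff.mpr h))
    simp [this]
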